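-- pv_equiv track=rewrite | github.com/jeongminllee/ProgrammersCodeTest | 백준/Gold/23978. 급상승/급상승.py | find_minimum_X
-- ===== SOURCE A (Python) =====
-- def calculate_total_money(N, dates, X):
--     total = 0
--     for i in range(N) :
--         current_date = dates[i]
--         next_date = dates[i + 1] if i < N - 1 else float('inf')
--         days = next_date - current_date
--
--         if days >= X :
--             # X 부터 1까지의 합 : X * (X+1) // 2
--             total += (X * (X + 1)) // 2
--         else :
--             # X 부터 (X - days + 1) 까지의 합
--             # 첫 항 : X, 마지막 항 : (X - days + 1), 항의 개수 : days
--             first = X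
--             last = X - days + 1
--             total += (first + last) * days // 2
--
--     return total
--
-- def find_minimum_X(N, K, dates):
--     left = 1
--     right = K  # 최대값으로 K를 설정
--
--     # 이분 탐색
--     while left <= right:
--         mid = (left + right) // 2
--         total_money = calculate_total_money(N, dates, mid)
--
--         if total_money >= K:
--             right = mid - 1
--         else:
--             left = mid + 1
--
--     return left
-- ===== SOURCE B (Python) =====
-- def find_minimum_X(N, K, dates):
--     # Precompute: sorted finite gaps + prefix sums of gaps and squared gaps,
--     # so each candidate X is evaluated in O(log N) instead of O(N).
--     m = N - 1 if N >= 1 else 0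
--     gaps = sorted([dates[i + 1] - dates[i] for i in range(m)])
--     s1 = [0]
--     for d in gaps:
--         s1.append(s1[-1] + d)
--     s2 = [0]
--     for d in gaps:
--         s2.append(s2[-1] + d * d)
--
--     def total(X):
--         if N < 1:
--             return 0
--         # bisect_left(gaps, X): first index whose gap is >= X
--         lo, hi = 0, m
--         while lo < hi:
--             mid = (lo + hi) // 2
--             if gaps[mid] < X:
--                 lo = mid + 1
--             else:
--                 hi = mid
--         k = lo
--         # gaps[k:] and the unbounded last stretch each contribute the full sum X..1;
--         # each shorter gap d contributes ((2X+1)d - d^2)/2, an exact (even) division.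
--         return (X * (X + 1) // 2) * (m - k + 1) + ((2 * X + 1) * s1[k] - s2[k]) // 2
--
--     left = 1
--     right = K
--     while left <= right:
--         mid = (left + right) // 2
--         if total(mid) >= K:
--             right = mid - 1
--         else:
--             left = mid + 1
--     return left
-- ===== Notes on version B (the rewrite author's own statement) =====
-- stated objective: faster
-- what changed: Instead of rescanning all N intervals for every binary-search probe, B sorts the N-1 finite gaps once, builds prefix sums of gaps and squared gaps, and evaluates each candidate X with a bisect plus two O(1) prefix-sum lookups.
-- outside the precondition, e.g. on find_minimum_X(10, 0, []): A returns 1, B raises IndexError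
import Mathlib
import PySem

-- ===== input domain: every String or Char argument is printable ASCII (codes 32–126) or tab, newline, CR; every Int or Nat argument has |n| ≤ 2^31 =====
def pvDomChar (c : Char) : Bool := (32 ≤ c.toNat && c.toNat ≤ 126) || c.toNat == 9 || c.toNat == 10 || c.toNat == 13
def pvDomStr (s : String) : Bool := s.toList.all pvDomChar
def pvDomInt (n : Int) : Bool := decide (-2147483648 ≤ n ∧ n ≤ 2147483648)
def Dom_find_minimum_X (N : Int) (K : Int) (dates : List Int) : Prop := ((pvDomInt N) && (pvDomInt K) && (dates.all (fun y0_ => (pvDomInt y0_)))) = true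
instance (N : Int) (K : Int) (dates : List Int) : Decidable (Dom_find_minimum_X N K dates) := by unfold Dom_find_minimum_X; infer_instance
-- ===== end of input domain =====

-- B sorts the gaps once and answers each binary-search probe from prefix sums in
-- O(log N) instead of A's O(N) rescan; return values agree on all admitted inputs.

-- ===== PORT A =====
-- helper calculate_total_money of A; the virtual last interval has
-- next_date = float('inf'), so there 'days >= X' always holds (X is a bounded int)
def calculate_total_money (N : Int) (dates : List Int) (X : Int) : Int :=
  (PySem.List.pyRange 0 N 1).foldl (fun total i =>
    let current_date := PySem.List.pyGetD dates i 0
    if i < N - 1 then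
      let next_date := PySem.List.pyGetD dates (i + 1) 0
      let days := next_date - current_date
      if days ≥ X then total + PySem.Int.floordiv (X * (X + 1)) 2
      else total + PySem.Int.floordiv ((X + (X - days + 1)) * days) 2
    else
      total + PySem.Int.floordiv (X * (X + 1)) 2) 0

-- the 'while left <= right' binary search of A; fuel = (right - left + 1).toNat is the
-- loop's decreasing measure (a pure totality device: with enough fuel it never runs out)
def pvLoopA (N : Int) (K : Int) (dates : List Int) : Nat → Int → Int → Int
  | 0, left, _ => left
  | fuel + 1, left, right =>
    if left ≤ right then
      let mid := PySem.Int.floordiv (left + right) 2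
      if calculate_total_money N dates mid ≥ K then pvLoopA N K dates fuel left (mid - 1)
      else pvLoopA N K dates fuel (mid + 1) right
    else left

def find_minimum_X (N : Int) (K : Int) (dates : List Int) : Int :=
  pvLoopA N K dates (K - 1 + 1).toNat 1 K

-- ===== PORT B =====
-- hand-written bisect_left loop of B ('while lo < hi: …'); fuel = (hi - lo).toNat is
-- the loop's decreasing measure (a pure totality device)
def pvBis (gaps : List Int) (X : Int) : Nat → Int → Int → Int
  | 0, lo, _ => lo
  | fuel + 1, lo, hi =>
    if lo < hi then
      let mid := PySem.Int.floordiv (lo + hi) 2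
      if PySem.List.pyGetD gaps mid 0 < X then pvBis gaps X fuel (mid + 1) hi
      else pvBis gaps X fuel lo mid
    else lo

-- B's 'total(X)': bisect into the sorted gaps, then two prefix-sum lookups
def pvTotalB (N : Int) (m : Int) (gaps s1 s2 : List Int) (X : Int) : Int :=
  if N < 1 then 0
  else
    let k := pvBis gaps X m.toNat 0 m
    PySem.Int.floordiv (X * (X + 1)) 2 * (m - k + 1)
      + PySem.Int.floordiv
          ((2 * X + 1) * PySem.List.pyGetD s1 k 0 - PySem.List.pyGetD s2 k 0) 2

-- B's outer 'while left <= right' binary search (same search, cheaper probe);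
-- fuel = (right - left + 1).toNat, exactly as in pvLoopA
def pvLoopB (N : Int) (K : Int) (m : Int) (gaps s1 s2 : List Int) : Nat → Int → Int → Int
  | 0, left, _ => left
  | fuel + 1, left, right =>
    if left ≤ right then
      let mid := PySem.Int.floordiv (left + right) 2
      if pvTotalB N m gaps s1 s2 mid ≥ K then pvLoopB N K m gaps s1 s2 fuel left (mid - 1)
      else pvLoopB N K m gaps s1 s2 fuel (mid + 1) right
    else left

def find_minimum_X_alt (N : Int) (K : Int) (dates : List Int) : Int :=
  let m := if N ≥ 1 then N - 1 else 0
  let gaps := PySem.List.sorted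
    ((PySem.List.pyRange 0 m 1).map (fun i =>
      PySem.List.pyGetD dates (i + 1) 0 - PySem.List.pyGetD dates i 0)) (fun x => x) false
  let s1 := gaps.foldl (fun s d => s ++ [PySem.List.pyGetD s (-1) 0 + d]) [0]
  let s2 := gaps.foldl (fun s d => s ++ [PySem.List.pyGetD s (-1) 0 + d * d]) [0]
  pvLoopB N K m gaps s1 s2 (K - 1 + 1).toNat 1 K

-- ===== PRECONDITION & SPEC =====
-- Pre_ excludes inputs with N > len(dates): there A raises IndexError on its first probe
-- whenever K >= 1, and returns 1 untouched only when K < 1 (the search range is empty),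
-- while B's upfront gap precomputation naturally raises IndexError there.
def Pre_find_minimum_X (N : Int) (K : Int) (dates : List Int) : Prop :=
  N ≤ (dates.length : Int)
instance (N : Int) (K : Int) (dates : List Int) : Decidable (Pre_find_minimum_X N K dates) := by
  unfold Pre_find_minimum_X; infer_instance

def pvWitness_find_minimum_X : Int × Int × List Int := (2, 5, [0, 3])

def Spec_find_minimum_X (N : Int) (K : Int) (dates : List Int) (out : Int) : Prop := out = find_minimum_X_alt N K dates
instance (N : Int) (K : Int) (dates : List Int) (out : Int) : Decidable (Spec_find_minimum_X N K dates out) := by unfold Spec_find_minimum_X; infer_instance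

-- ===== CLAIM (what is proved, stated in full; the proofs are below) =====
def Claim_equal_find_minimum_X : Prop := ∀ (N : Int) (K : Int) (dates : List Int), Dom_find_minimum_X N K dates → Pre_find_minimum_X N K dates → Spec_find_minimum_X N K dates (find_minimum_X N K dates)

-- ===== LEMMAS AND PROOFS =====

-- per-gap contribution of A (d = days of the interval)
def pvF (X d : Int) : Int :=
  if d ≥ X then PySem.Int.floordiv (X * (X + 1)) 2
  else PySem.Int.floordiv ((X + (X - d + 1)) * d) 2

def pvGap (dates : List Int) (i : Int) : Int :=
  PySem.List.pyGetD dates (i + 1) 0 - PySem.List.pyGetD dates i 0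

-- A's loop as a sum over the N-1 finite gaps plus the infinite last interval
lemma calcA_eq_sum (N : Int) (dates : List Int) (X : Int) (hN : 1 ≤ N) :
    calculate_total_money N dates X
      = ((PySem.List.pyRange 0 (N - 1) 1).map (fun i => pvF X (pvGap dates i))).sum
          + PySem.Int.floordiv (X * (X + 1)) 2 := by
  have hsing : PySem.List.pyRange (N - 1) N 1 = [N - 1] := by
    have h := PySem.List.pyRange_one_singleton (N - 1)
    rw [sub_add_cancel] at h
    exact h
  unfold calculate_total_money
  rw [PySem.List.pyRange_one_append 0 (N - 1) N (by omega) (by omega), hsing,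
    List.foldl_append, List.foldl_cons, List.foldl_nil]
  simp only []
  rw [if_neg (lt_irrefl (N - 1))]
  rw [PySem.List.foldl_congr_mem _ _
      (fun acc i => acc + pvF X (pvGap dates i)) _
      (by
        intro acc i hi
        have h1 := PySem.List.mem_pyRange_one.mp hi
        simp only [pvF, pvGap]
        rw [if_pos (show i < N - 1 from by omega)]
        split_ifs <;> rfl)]
  rw [PySem.List.foldl_add]
  simp

-- Python's s[-1] on a non-empty list (snoc form)
lemma pyGetD_snoc_last (s : List Int) (x : Int) :
    PySem.List.pyGetD (s ++ [x]) (-1) 0 = x := by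
  simp [PySem.List.pyGetD, PySem.List.pyGet?, PySem.List.pyIdx?]

-- running prefix scan from accumulator a
def pvScanAux (f : Int → Int) (a : Int) : List Int → List Int
  | [] => []
  | d :: t => (a + f d) :: pvScanAux f (a + f d) t

lemma pvScanAux_length (f : Int → Int) : ∀ (g : List Int) (a : Int),
    (pvScanAux f a g).length = g.length := by
  intro g
  induction g with
  | nil => intro a; simp [pvScanAux]
  | cons d t ih => intro a; simp [pvScanAux, ih]

lemma pvScanAux_getElem (f : Int → Int) : ∀ (g : List Int) (a : Int) (j : Nat)
    (hj : j < g.length),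
    (pvScanAux f a g)[j]'(by rw [pvScanAux_length]; exact hj)
      = a + ((g.take (j + 1)).map f).sum := by
  intro g
  induction g with
  | nil => intro a j hj; simp at hj
  | cons d t ih =>
    intro a j hj
    cases j with
    | zero => simp [pvScanAux]
    | succ j' =>
      simp only [pvScanAux, List.getElem_cons_succ]
      rw [ih (a + f d) j' (by simpa using hj)]
      simp [List.take_succ_cons]
      ring

lemma scan_fold (f : Int → Int) : ∀ (g s : List Int) (a : Int), s ≠ [] →
    s.getLast? = some a →
    g.foldl (fun s d => s ++ [PySem.List.pyGetD s (-1) 0 + f d]) s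
      = s ++ pvScanAux f a g := by
  intro g
  induction g with
  | nil => intro s a _ _; simp [pvScanAux]
  | cons d t ih =>
    intro s a hs hlast
    obtain ⟨s', rfl⟩ : ∃ s', s = s' ++ [a] := by
      rcases List.getLast?_eq_some_iff.mp hlast with ⟨s', h⟩
      exact ⟨s', h⟩
    rw [List.foldl_cons, pyGetD_snoc_last,
      ih ((s' ++ [a]) ++ [a + f d]) (a + f d) (by simp) (by simp)]
    simp [pvScanAux]

-- value of the prefix-sum list at index k
lemma scan_getD (g : List Int) (f : Int → Int) (k : Nat) (hk : k ≤ g.length) :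
    PySem.List.pyGetD
      (g.foldl (fun s d => s ++ [PySem.List.pyGetD s (-1) 0 + f d]) [0]) (k : Int) 0
      = ((g.take k).map f).sum := by
  rw [scan_fold f g [0] 0 (by simp) (by simp), List.singleton_append]
  cases k with
  | zero =>
    rw [PySem.List.pyGetD_eq_getElem _ _ (by omega)
      (by simp only [List.length_cons, pvScanAux_length]; omega)]
    simp
  | succ j =>
    rw [PySem.List.pyGetD_eq_getElem _ _ (by omega)
      (by simp only [List.length_cons, pvScanAux_length]; omega)]
    have hidx : ((((j : Nat) + 1 : Nat) : Int)).toNat = j + 1 := by omega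
    simp only [hidx, List.getElem_cons_succ]
    rw [pvScanAux_getElem f g 0 j (by omega)]
    simp

-- monotone access into a ≤-sorted list
lemma sorted_getElem_mono (gaps : List Int) (hs : gaps.Pairwise (· ≤ ·))
    (p q : Nat) (hp : p < gaps.length) (hq : q < gaps.length) (hpq : p ≤ q) :
    gaps[p] ≤ gaps[q] := by
  rcases Nat.lt_or_ge p q with h | h
  · exact List.pairwise_iff_getElem.mp hs p q hp hq h
  · have : p = q := by omega
    subst this
    exact le_rfl

-- bisect invariant: result is a Nat k splitting the sorted list at X
lemma pvBis_inv (gaps : List Int) (X : Int) (hs : gaps.Pairwise (· ≤ ·)) :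
    ∀ (fuel : Nat) (lo hi : Int), (hi - lo).toNat ≤ fuel → 0 ≤ lo → lo ≤ hi →
    hi ≤ (gaps.length : Int) →
    (∀ (j : Nat) (h : j < gaps.length), (j : Int) < lo → gaps[j] < X) →
    (∀ (j : Nat) (h : j < gaps.length), hi ≤ (j : Int) → ¬ gaps[j] < X) →
    ∃ k : Nat, pvBis gaps X fuel lo hi = (k : Int) ∧ k ≤ gaps.length ∧
      (∀ (j : Nat) (h : j < gaps.length), j < k → gaps[j] < X) ∧
      (∀ (j : Nat) (h : j < gaps.length), k ≤ j → ¬ gaps[j] < X) := by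
  intro fuel
  induction fuel with
  | zero =>
    intro lo hi hf h0 hlh hhi hlow hhigh
    refine ⟨lo.toNat, by simp [pvBis]; omega, by omega, ?_, ?_⟩
    · intro j hj hjlt
      exact hlow j hj (by omega)
    · intro j hj hjge
      exact hhigh j hj (by omega)
  | succ fuel ih =>
    intro lo hi hf h0 hlh hhi hlow hhigh
    simp only [pvBis]
    by_cases hlt : lo < hi
    · simp only [if_pos hlt]
      have hb := PySem.Int.floordiv_two_mid_bounds (le_of_lt hlt)
      have hmlt : PySem.Int.floordiv (lo + hi) 2 < hi :=
        (PySem.Int.floordiv_lt_iff_lt_mul (by norm_num)).mpr (by omega)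
      set mid := PySem.Int.floordiv (lo + hi) 2 with hmid
      have hmn : mid.toNat < gaps.length := by omega
      have hget : PySem.List.pyGetD gaps mid 0 = gaps[mid.toNat] :=
        PySem.List.pyGetD_eq_getElem _ _ (by omega) (by omega)
      by_cases hc : PySem.List.pyGetD gaps mid 0 < X
      · simp only [if_pos hc]
        refine ih (mid + 1) hi (by omega) (by omega) (by omega) hhi ?_ hhigh
        intro j hj hjlt
        have hle : gaps[j] ≤ gaps[mid.toNat] :=
          sorted_getElem_mono gaps hs j mid.toNat hj hmn (by omega)
        rw [hget] at hc
        omega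
      · simp only [if_neg hc]
        refine ih lo mid (by omega) h0 (by omega) (by omega) hlow ?_
        intro j hj hjge
        have hle : gaps[mid.toNat] ≤ gaps[j] :=
          sorted_getElem_mono gaps hs mid.toNat j hmn hj (by omega)
        rw [hget] at hc
        omega
    · simp only [if_neg hlt]
      refine ⟨lo.toNat, by omega, by omega, ?_, ?_⟩
      · intro j hj hjlt
        exact hlow j hj (by omega)
      · intro j hj hjge
        exact hhigh j hj (by omega)

-- exact halving distributes over a sum of even terms
lemma sum_halves : ∀ (l : List Int), (∀ a ∈ l, (2:Int) ∣ a) →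
    (l.map (fun a => PySem.Int.floordiv a 2)).sum = PySem.Int.floordiv l.sum 2 := by
  intro l
  induction l with
  | nil =>
    intro _
    simp
  | cons a t ih =>
    intro h
    have ha := h a List.mem_cons_self
    have ht := ih (fun b hb => h b (List.mem_cons_of_mem _ hb))
    simp only [List.map_cons, List.sum_cons]
    rw [ht, PySem.Int.floordiv_eq_ediv_of_pos (by norm_num : (0:Int) < 2),
      PySem.Int.floordiv_eq_ediv_of_pos (by norm_num : (0:Int) < 2),
      PySem.Int.floordiv_eq_ediv_of_pos (by norm_num : (0:Int) < 2),
      Int.add_ediv_of_dvd_left ha]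

lemma term_even (X d : Int) : (2:Int) ∣ (X + (X - d + 1)) * d := by
  rcases Int.even_or_odd d with ⟨c, hc⟩ | ⟨c, hc⟩
  · exact ⟨(X + (X - d + 1)) * c, by rw [hc]; ring⟩
  · exact ⟨(X - c) * d, by rw [hc]; ring⟩

lemma lin_sum (X : Int) : ∀ (l : List Int),
    (l.map (fun d => (X + (X - d + 1)) * d)).sum
      = (2 * X + 1) * l.sum - (l.map (fun d => d * d)).sum := by
  intro l
  induction l with
  | nil => simp
  | cons a t ih =>
    simp only [List.map_cons, List.sum_cons]
    rw [ih]
    ring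

-- the main pointwise fact: A's total equals B's prefix-sum total
lemma total_eq (N : Int) (dates : List Int) (X : Int)
    (hpre : N ≤ (dates.length : Int)) :
    calculate_total_money N dates X
      = pvTotalB N (if N ≥ 1 then N - 1 else 0)
          (PySem.List.sorted
            ((PySem.List.pyRange 0 (if N ≥ 1 then N - 1 else 0) 1).map (fun i =>
              PySem.List.pyGetD dates (i + 1) 0 - PySem.List.pyGetD dates i 0)) (fun x => x) false)
          ((PySem.List.sorted
            ((PySem.List.pyRange 0 (if N ≥ 1 then N - 1 else 0) 1).map (fun i =>
              PySem.List.pyGetD dates (i + 1) 0 - PySem.List.pyGetD dates i 0)) (fun x => x) false).foldl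
              (fun s d => s ++ [PySem.List.pyGetD s (-1) 0 + d]) [0])
          ((PySem.List.sorted
            ((PySem.List.pyRange 0 (if N ≥ 1 then N - 1 else 0) 1).map (fun i =>
              PySem.List.pyGetD dates (i + 1) 0 - PySem.List.pyGetD dates i 0)) (fun x => x) false).foldl
              (fun s d => s ++ [PySem.List.pyGetD s (-1) 0 + d * d]) [0])
          X := by
  by_cases hN : N ≥ 1
  case neg =>
    unfold calculate_total_money pvTotalB
    rw [PySem.List.pyRange_one_eq_nil (by omega), if_pos (by omega : N < 1)]
    simp
  case pos =>
    rw [if_pos hN]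
    have hGfun : (fun i => PySem.List.pyGetD dates (i + 1) 0 - PySem.List.pyGetD dates i 0)
        = pvGap dates := rfl
    rw [hGfun]
    set gapsI := (PySem.List.pyRange 0 (N - 1) 1).map (pvGap dates) with hgapsI
    set gaps := PySem.List.sorted gapsI (fun x => x) false with hgaps
    have hlenI : gapsI.length = (N - 1).toNat := by
      rw [hgapsI, List.length_map, PySem.List.length_pyRange_one]
      omega
    have hlen : gaps.length = (N - 1).toNat := by
      rw [hgaps, PySem.List.length_sorted, hlenI]
    have hperm : gaps.Perm gapsI := PySem.List.sorted_perm gapsI (fun x => x) false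
    have hpair : gaps.Pairwise (· ≤ ·) := by
      have := PySem.List.sorted_pairwise gapsI (fun x => x)
      simpa using this
    -- A side
    have hAmap : List.map (fun i => pvF X (pvGap dates i)) (PySem.List.pyRange 0 (N - 1) 1)
        = gapsI.map (pvF X) := by
      rw [hgapsI, List.map_map]
      rfl
    rw [calcA_eq_sum N dates X hN, hAmap, ← (hperm.map (pvF X)).sum_eq]
    -- B side
    unfold pvTotalB
    rw [if_neg (by omega : ¬ N < 1)]
    obtain ⟨k, hkeq, hkle, hklt, hkge⟩ :=
      pvBis_inv gaps X hpair (N - 1).toNat 0 (N - 1) (by omega) (by omega) (by omega)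
        (by omega) (by intro j hj hjlt; omega)
        (by intro j hj hjge; rw [hlen] at hj; omega)
    rw [hkeq]
    have hs1 := scan_getD gaps (fun d => d) k hkle
    have hs2 := scan_getD gaps (fun d => d * d) k hkle
    beta_reduce at hs1 hs2
    simp only [hs1, hs2]
    -- split the sum at k
    have hsplit := congrArg (fun l => (List.map (pvF X) l).sum) (List.take_append_drop k gaps)
    simp only [List.map_append, List.sum_append] at hsplit
    rw [← hsplit]
    -- take part: every gap < X
    have htake : ∀ d ∈ gaps.take k, d < X := by
      intro d hd
      obtain ⟨i, hi, rfl⟩ := List.mem_iff_getElem.mp hd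
      have hil : i < gaps.length := by
        have := hi; simp [List.length_take] at this; omega
      rw [List.getElem_take]
      exact hklt i hil (by have := hi; simp [List.length_take] at this; omega)
    have hdrop : ∀ d ∈ gaps.drop k, ¬ d < X := by
      intro d hd
      obtain ⟨i, hi, rfl⟩ := List.mem_iff_getElem.mp hd
      rw [List.getElem_drop]
      exact hkge (k + i) (by have := hi; simp [List.length_drop] at this; omega) (by omega)
    have htakemap : (gaps.take k).map (pvF X)
        = ((gaps.take k).map (fun d => (X + (X - d + 1)) * d)).map
            (fun a => PySem.Int.floordiv a 2) := by
      rw [List.map_map]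
      apply List.map_congr_left
      intro d hd
      have := htake d hd
      simp [pvF, if_neg (show ¬ d ≥ X by omega)]
    have hdropmap : (gaps.drop k).map (pvF X)
        = (gaps.drop k).map (fun _ => PySem.Int.floordiv (X * (X + 1)) 2) := by
      apply List.map_congr_left
      intro d hd
      have := hdrop d hd
      simp [pvF, if_pos (show d ≥ X by omega)]
    rw [htakemap, hdropmap,
      sum_halves _ (by intro a ha; obtain ⟨d, _, rfl⟩ := List.mem_map.mp ha; exact term_even X d),
      lin_sum X, PySem.List.sum_map_const_int]
    have hmapid : (gaps.take k).map (fun d => d) = gaps.take k := by simp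
    rw [hmapid]
    have hlendrop : ((gaps.drop k).length : Int) = (N - 1) - k := by
      simp [List.length_drop, hlen]; omega
    rw [hlendrop]
    ring

-- identical outer binary searches with pointwise-equal probe functions coincide
lemma loops_eq (N K : Int) (dates : List Int) (m : Int) (gaps s1 s2 : List Int)
    (h : ∀ X, calculate_total_money N dates X = pvTotalB N m gaps s1 s2 X) :
    ∀ (fuel : Nat) (left right : Int),
      pvLoopA N K dates fuel left right = pvLoopB N K m gaps s1 s2 fuel left right := by
  intro fuel
  induction fuel with
  | zero => intro l r; rfl
  | succ fuel ih =>
    intro l r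
    simp only [pvLoopA, pvLoopB, ← h]
    by_cases hlr : l ≤ r
    · simp only [if_pos hlr]
      by_cases hge : calculate_total_money N dates (PySem.Int.floordiv (l + r) 2) ≥ K
      · simp only [if_pos hge, ih]
      · simp only [if_neg hge, ih]
    · simp only [if_neg hlr]

-- ===== VERDICT (by name: the statement is the Claim_ definition above) =====
theorem find_minimum_X_spec : Claim_equal_find_minimum_X := by
  intro N K dates _hdom hpre
  unfold Spec_find_minimum_X find_minimum_X find_minimum_X_alt
  exact loops_eq N K dates _ _ _ _ (fun X => total_eq N dates X hpre) (K - 1 + 1).toNat 1 K
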